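-- pv_equiv track=rewrite | github.com/alexjx/pytdx | analyze/market_flow_experiment.py | _group_contiguous_refs
-- ===== SOURCE A (Python) =====
-- def _group_contiguous_refs(rows):
--     # 7d2c chunk refs in this capture increase by 0x100 for same table batch.
--     rows = sorted(rows, key=lambda x: x["ref"])
--     groups = []
--     cur = []
--     prev = None
--     for r in rows:
--         if prev is None or r["ref"] - prev == 0x0100:
--             cur.append(r)
--         else:
--             groups.append(cur)
--             cur = [r]
--         prev = r["ref"]
--     if cur:
--         groups.append(cur)
--     return groups
-- ===== SOURCE B (Python) =====
-- def _group_contiguous_refs(rows):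
--     # Build the groups back-to-front: walk the sorted rows in reverse and either
--     # prepend the row to the current front group (when the gap to its first row
--     # is 0x100) or open a new front group.
--     rows = sorted(rows, key=lambda x: x["ref"])
--     groups = []
--     for r in reversed(rows):
--         if groups and groups[0][0]["ref"] - r["ref"] == 0x100:
--             groups[0].insert(0, r)
--         else:
--             groups.insert(0, [r])
--     return groups
-- ===== Notes on version B (the rewrite author's own statement) =====
-- stated objective: alternative
-- what changed: B builds the group list back-to-front: a single reverse pass that prepends each row to the leading group (gap 0x100 to its first element) or opens a new leading group, replacing A's forward pass with groups/cur/prev accumulators and a final flush.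
import Mathlib
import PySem

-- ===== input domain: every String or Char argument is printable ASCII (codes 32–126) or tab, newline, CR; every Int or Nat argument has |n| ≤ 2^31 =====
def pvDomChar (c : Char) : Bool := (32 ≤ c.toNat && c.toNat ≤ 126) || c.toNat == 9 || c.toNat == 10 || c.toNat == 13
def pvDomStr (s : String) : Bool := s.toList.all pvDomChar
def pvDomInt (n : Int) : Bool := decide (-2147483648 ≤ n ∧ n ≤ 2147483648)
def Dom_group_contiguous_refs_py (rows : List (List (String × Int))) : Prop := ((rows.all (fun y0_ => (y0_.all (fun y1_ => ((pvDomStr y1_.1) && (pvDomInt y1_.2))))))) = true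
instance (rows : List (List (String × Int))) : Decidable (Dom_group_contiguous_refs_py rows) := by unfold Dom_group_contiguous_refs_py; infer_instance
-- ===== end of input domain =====

-- B builds the group list back-to-front (reverse pass prepending into the leading group)
-- instead of A's forward pass with groups/cur/prev accumulators and a final flush; same cost, different decomposition.


-- shared helper: r["ref"] (Pre_ guarantees the key is present, so the 0 default is never consulted)
def pvRef (r : List (String × Int)) : Int := ((PySem.Dict.mk r).get? "ref").getD 0

-- ===== PORT A =====
-- one loop step of A: state (groups, cur, prev)
def pvStepA (st : List (List (List (String × Int))) × List (List (String × Int)) × Option Int)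
    (r : List (String × Int)) :
    List (List (List (String × Int))) × List (List (String × Int)) × Option Int :=
  match st with
  | (groups, cur, prev) =>
    if prev = none ∨ pvRef r - prev.getD 0 = 256 then (groups, cur ++ [r], some (pvRef r))
    else (groups ++ [cur], [r], some (pvRef r))

def group_contiguous_refs_py (rows : List (List (String × Int))) : List (List (List (String × Int))) :=
  let rows := PySem.List.sorted rows (fun x => pvRef x) false
  let st := rows.foldl pvStepA ([], [], none)
  if st.2.1 ≠ [] then st.1 ++ [st.2.1] else st.1

-- ===== PORT B =====
-- one reverse-pass step of B: prepends r to the leading group or opens a new one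
def pvStepB (r : List (String × Int)) (groups : List (List (List (String × Int)))) :
    List (List (List (String × Int))) :=
  match groups with
  | (r0 :: g0) :: gs =>
    if pvRef r0 - pvRef r = 256 then (r :: r0 :: g0) :: gs else [r] :: (r0 :: g0) :: gs
  | other => [r] :: other

def group_contiguous_refs_py_alt (rows : List (List (String × Int))) : List (List (List (String × Int))) :=
  let rows := PySem.List.sorted rows (fun x => pvRef x) false
  rows.foldr pvStepB []

-- ===== PRECONDITION & SPEC =====
-- Pre_ excludes rows missing the "ref" key, on which Python A raises KeyError.
def Pre_group_contiguous_refs_py (rows : List (List (String × Int))) : Prop :=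
  ∀ r ∈ rows, ((PySem.Dict.mk r).get? "ref").isSome = true
instance (rows : List (List (String × Int))) : Decidable (Pre_group_contiguous_refs_py rows) := by
  unfold Pre_group_contiguous_refs_py; infer_instance
def pvWitness_group_contiguous_refs_py : (List (List (String × Int))) := [[("ref", 256)], [("ref", 512)], [("ref", 0)]]

def Spec_group_contiguous_refs_py (rows : List (List (String × Int))) (out : List (List (List (String × Int)))) : Prop := out = group_contiguous_refs_py_alt rows
instance (rows : List (List (String × Int))) (out : List (List (List (String × Int)))) : Decidable (Spec_group_contiguous_refs_py rows out) := by unfold Spec_group_contiguous_refs_py; infer_instance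

-- ===== CLAIM (what is proved, stated in full; the proofs are below) =====
def Claim_equal_group_contiguous_refs_py : Prop := ∀ (rows : List (List (String × Int))), Dom_group_contiguous_refs_py rows → Pre_group_contiguous_refs_py rows → Spec_group_contiguous_refs_py rows (group_contiguous_refs_py rows)

-- ===== LEMMAS AND PROOFS =====

-- reference description of one run: given the previous ref p, split l into the tail of the
-- current run and the remaining groups
def pvRuns (p : Int) : List (List (String × Int)) → List (List (String × Int)) × List (List (List (String × Int)))
  | [] => ([], [])
  | r :: rest =>
    let c := pvRuns (pvRef r) rest
    if pvRef r - p = 256 then (r :: c.1, c.2) else ([], (r :: c.1) :: c.2)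

theorem pvA_foldl (l : List (List (String × Int)))
    (gs : List (List (List (String × Int)))) (cur : List (List (String × Int))) (p : Int)
    (hcur : cur ≠ []) :
    (if (l.foldl pvStepA (gs, cur, some p)).2.1 ≠ [] then
       (l.foldl pvStepA (gs, cur, some p)).1 ++ [(l.foldl pvStepA (gs, cur, some p)).2.1]
     else (l.foldl pvStepA (gs, cur, some p)).1) =
      gs ++ (cur ++ (pvRuns p l).1) :: (pvRuns p l).2 := by
  induction l generalizing gs cur p with
  | nil => simp [pvRuns, hcur]
  | cons r rest ih =>
    simp only [List.foldl_cons, pvStepA, Option.getD_some, reduceCtorEq, false_or]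
    by_cases h : pvRef r - p = 256
    · rw [if_pos h, ih gs (cur ++ [r]) (pvRef r) (by simp)]
      simp [pvRuns, h]
    · rw [if_neg h, ih (gs ++ [cur]) [r] (pvRef r) (by simp)]
      simp [pvRuns, h]

theorem pvB_foldr (l : List (List (String × Int))) (r : List (String × Int)) :
    (r :: l).foldr pvStepB [] = (r :: (pvRuns (pvRef r) l).1) :: (pvRuns (pvRef r) l).2 := by
  induction l generalizing r with
  | nil => rfl
  | cons r' rest ih =>
    have : (r :: r' :: rest).foldr pvStepB [] = pvStepB r ((r' :: rest).foldr pvStepB []) := rfl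
    rw [this, ih r']
    simp only [pvStepB, pvRuns]
    by_cases h : pvRef r' - pvRef r = 256
    · simp [h]
    · simp [h]

-- ===== VERDICT (by name: the statement is the Claim_ definition above) =====
theorem group_contiguous_refs_py_spec : Claim_equal_group_contiguous_refs_py := by
  intro rows _ _
  unfold Spec_group_contiguous_refs_py group_contiguous_refs_py group_contiguous_refs_py_alt
  cases hs : PySem.List.sorted rows (fun x => pvRef x) false with
  | nil => rfl
  | cons r rest =>
    have h1 : pvStepA ([], [], none) r = ([], [r], some (pvRef r)) := by simp [pvStepA]
    simp only [List.foldl_cons, h1]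
    rw [pvA_foldl rest [] [r] (pvRef r) (by simp), pvB_foldr]
    simp
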